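-- pv_equiv track=rewrite | github.com/Salazar254/search-term-filter | src/matcher.py | is_phrase_match
-- ===== SOURCE A (Python) =====
-- def is_phrase_match(search_tokens: list[str], negative_tokens: list[str]) -> bool:
--     """
--     Checks for phrase match: negative_tokens must appear as a contiguous sub-sequence
--     in search_tokens.
--     """
--     n_len = len(negative_tokens)
--     s_len = len(search_tokens)
--
--     if n_len > s_len:
--         return False
--
--     for i in range(s_len - n_len + 1):
--         if search_tokens[i : i + n_len] == negative_tokens:
--             return True
--
--     return False
-- ===== SOURCE B (Python) =====
-- def is_phrase_match(search_tokens: list[str], negative_tokens: list[str]) -> bool: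
--     """
--     Single pass with a sliding window: stream the tokens once, keeping only the
--     last len(negative_tokens) of them, and compare the window after each step.
--     """
--     n = len(negative_tokens)
--     if n == 0:
--         return True
--     window = []
--     for token in search_tokens:
--         window.append(token)
--         if len(window) > n:
--             window.pop(0)
--         if window == negative_tokens:
--             return True
--     return False
-- ===== Notes on version B (the rewrite author's own statement) =====
-- stated objective: alternative
-- what changed: Replaces A's loop over start indices that builds and compares a fresh slice search_tokens[i:i+n] at each position with a single streaming pass that maintains a sliding window of the last n tokens (append + pop front) and compares it after each step.
import Mathlib
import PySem

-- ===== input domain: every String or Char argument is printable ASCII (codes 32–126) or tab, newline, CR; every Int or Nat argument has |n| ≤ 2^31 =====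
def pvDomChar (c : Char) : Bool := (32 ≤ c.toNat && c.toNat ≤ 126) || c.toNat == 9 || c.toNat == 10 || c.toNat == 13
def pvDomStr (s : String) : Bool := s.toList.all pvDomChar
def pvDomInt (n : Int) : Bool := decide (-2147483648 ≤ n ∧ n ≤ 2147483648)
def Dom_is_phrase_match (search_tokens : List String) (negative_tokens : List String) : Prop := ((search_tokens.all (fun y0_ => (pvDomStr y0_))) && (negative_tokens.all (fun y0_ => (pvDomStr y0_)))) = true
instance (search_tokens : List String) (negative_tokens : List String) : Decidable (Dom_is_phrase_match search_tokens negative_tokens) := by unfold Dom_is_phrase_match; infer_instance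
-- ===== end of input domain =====

-- B replaces A's loop over start indices with slice comparisons by a single streaming
-- pass maintaining a sliding window of the last n tokens (objective: alternative).

-- ===== PORT A =====
-- A: if n_len > s_len return False; else for i in range(s_len-n_len+1): if slice == neg: return True
def is_phrase_match (search_tokens : List String) (negative_tokens : List String) : Bool :=
  let n_len : Int := negative_tokens.length
  let s_len : Int := search_tokens.length
  if n_len > s_len then false
  else
    (PySem.List.pyRange 0 (s_len - n_len + 1) 1).any
      (fun i => PySem.List.slice search_tokens (some i) (some (i + n_len)) == negative_tokens)

-- ===== PORT B =====
-- B's loop: append the token to the window, pop the front if it overflows, compare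
def pvSlide (neg : List String) : List String → List String → Bool
  | _, [] => false
  | window, token :: rest =>
    let w1 := window ++ [token]
    let w2 := if neg.length < w1.length then w1.tail else w1
    if w2 == neg then true else pvSlide neg w2 rest

def is_phrase_match_alt (search_tokens : List String) (negative_tokens : List String) : Bool :=
  let n := negative_tokens.length
  if n == 0 then true
  else pvSlide negative_tokens [] search_tokens

-- ===== PRECONDITION & SPEC =====
def Spec_is_phrase_match (search_tokens : List String) (negative_tokens : List String) (out : Bool) : Prop := out = is_phrase_match_alt search_tokens negative_tokens
instance (search_tokens : List String) (negative_tokens : List String) (out : Bool) : Decidable (Spec_is_phrase_match search_tokens negative_tokens out) := by unfold Spec_is_phrase_match; infer_instance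

-- ===== CLAIM (what is proved, stated in full; the proofs are below) =====
def Claim_equal_is_phrase_match : Prop := ∀ (search_tokens : List String) (negative_tokens : List String), Dom_is_phrase_match search_tokens negative_tokens → Spec_is_phrase_match search_tokens negative_tokens (is_phrase_match search_tokens negative_tokens)

-- ===== LEMMAS AND PROOFS =====

lemma is_phrase_match_iff (s neg : List String) :
    is_phrase_match s neg = true ↔ ∃ k : ℕ, (s.drop k).take neg.length = neg := by
  unfold is_phrase_match
  by_cases hlen : (neg.length : Int) > (s.length : Int)
  · simp only [hlen, if_true]
    refine iff_of_false (by simp) ?_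
    rintro ⟨k, hk⟩
    have := congrArg List.length hk
    simp [List.length_take, List.length_drop] at this
    have hsl : (neg.length : Int) ≤ (s.length : Int) := by exact_mod_cast Nat.le_of_eq (by omega)
    omega
  · simp only [hlen, if_false, List.any_eq_true]
    constructor
    · rintro ⟨i, hi, hslice⟩
      have hmem := (PySem.List.mem_pyRange_one).mp hi
      obtain ⟨k, rfl⟩ : ∃ k : ℕ, i = (k : Int) := ⟨i.toNat, (Int.toNat_of_nonneg hmem.1).symm⟩
      refine ⟨k, ?_⟩
      rw [PySem.List.slice_natCast_add (xs := s) (j := k) (n := neg.length)] at hslice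
      exact beq_iff_eq.mp hslice
    · rintro ⟨k, hk⟩
      have hlk : neg.length ≤ s.length - k := by
        have := congrArg List.length hk
        simpa [List.length_take, List.length_drop] using this.symm.le
      by_cases hks : k ≤ s.length
      · refine ⟨(k : Int), ?_, ?_⟩
        · rw [PySem.List.mem_pyRange_one]
          refine ⟨Int.natCast_nonneg k, ?_⟩
          have : k + neg.length ≤ s.length := by omega
          omega
        · rw [PySem.List.slice_natCast_add (xs := s) (j := k) (n := neg.length)]
          exact beq_iff_eq.mpr hk
      · -- k past the end: the dropped list is empty, so neg must be []
        have hn0 : neg.length = 0 := by omega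
        have hneg : neg = [] := List.eq_nil_of_length_eq_zero hn0
        refine ⟨0, ?_, ?_⟩
        · rw [PySem.List.mem_pyRange_one]
          constructor
          · omega
          · have hle : (neg.length : Int) ≤ (s.length : Int) := not_lt.mp hlen
            omega
        · rw [hneg]
          simp [PySem.List.slice]

lemma pvSlide_iff (neg : List String) (hn : 0 < neg.length) :
    ∀ (rest w : List String), w.length ≤ neg.length →
      (pvSlide neg w rest = true ↔
        ∃ k : ℕ, k + neg.length ≤ w.length + rest.length ∧ w.length < k + neg.length ∧
          ((w ++ rest).drop k).take neg.length = neg) := by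
  intro rest
  induction rest with
  | nil =>
    intro w hw
    refine iff_of_false (by simp [pvSlide]) ?_
    rintro ⟨k, h1, h2, -⟩
    simp only [List.length_nil] at h1
    omega
  | cons t r ih =>
    intro w hw
    have hlen1 : (w ++ [t]).length = w.length + 1 := by simp
    have happ : w ++ t :: r = (w ++ [t]) ++ r := by simp
    by_cases hpop : neg.length < (w ++ [t]).length
    · -- window overflows: w.length = neg.length, front is popped
      have hwn : w.length = neg.length := by omega
      have htail : (w ++ [t]).tail = (w ++ [t]).drop 1 := List.drop_one.symm
      have hw2len : ((w ++ [t]).drop 1).length = neg.length := by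
        simp only [List.length_drop]; omega
      have hrw : (w ++ [t]).drop 1 ++ r = (w ++ t :: r).drop 1 := by
        rw [happ]; exact (List.drop_append_of_le_length (by simp)).symm
      by_cases hmatch : (w ++ [t]).drop 1 = neg
      · have hbeq : ((w ++ [t]).tail == neg) = true := by
          rw [htail]; exact beq_iff_eq.mpr hmatch
        refine iff_of_true ?_ ?_
        · simp only [pvSlide]
          rw [if_pos hpop, if_pos hbeq]
        · refine ⟨1, by simp only [List.length_cons]; omega, by omega, ?_⟩
          rw [← hrw, hmatch, List.take_left' rfl]
      · have hbeq : ((w ++ [t]).tail == neg) = false := by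
          rw [htail]; exact beq_eq_false_iff_ne.mpr hmatch
        have hstep : pvSlide neg w (t :: r) = pvSlide neg ((w ++ [t]).drop 1) r := by
          simp only [pvSlide]
          rw [if_pos hpop, if_neg (by simp [hbeq]), htail]
        rw [hstep, ih _ (le_of_eq hw2len)]
        constructor
        · rintro ⟨k, h1, h2, h3⟩
          refine ⟨k + 1, ?_, by omega, ?_⟩
          · rw [hw2len] at h1; simp only [List.length_cons]; omega
          · rw [hrw, List.drop_drop] at h3
            rw [show k + 1 = 1 + k by omega]
            exact h3
        · rintro ⟨k, h1, h2, h3⟩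
          obtain ⟨k', rfl⟩ : ∃ k', k = k' + 1 := ⟨k - 1, by omega⟩
          rcases Nat.eq_zero_or_pos k' with hk0 | hk0
          · subst hk0
            exfalso
            apply hmatch
            have h3' : ((w ++ t :: r).drop 1).take neg.length = neg := h3
            rw [← hrw, List.take_append_of_le_length (le_of_eq hw2len.symm),
              List.take_of_length_le (le_of_eq hw2len)] at h3'
            exact h3'
          · refine ⟨k', ?_, by omega, ?_⟩
            · rw [hw2len]; simp only [List.length_cons] at h1; omega
            · rw [hrw, List.drop_drop, show 1 + k' = k' + 1 by omega]
              exact h3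
    · -- window still short: no pop
      have hwlt : w.length + 1 ≤ neg.length := by omega
      by_cases hmatch : w ++ [t] = neg
      · have hbeq : ((w ++ [t]) == neg) = true := beq_iff_eq.mpr hmatch
        have hlenm : (w ++ [t]).length = neg.length := by rw [hmatch]
        refine iff_of_true ?_ ?_
        · simp only [pvSlide]
          rw [if_neg hpop, if_pos hbeq]
        · refine ⟨0, by simp only [List.length_cons]; omega, by omega, ?_⟩
          rw [List.drop_zero, happ, List.take_left' hlenm, hmatch]
      · have hbeq : ((w ++ [t]) == neg) = false := beq_eq_false_iff_ne.mpr hmatch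
        have hstep : pvSlide neg w (t :: r) = pvSlide neg (w ++ [t]) r := by
          simp only [pvSlide]
          rw [if_neg hpop, if_neg (by simp [hbeq])]
        rw [hstep, ih _ (by omega)]
        constructor
        · rintro ⟨k, h1, h2, h3⟩
          refine ⟨k, ?_, by omega, ?_⟩
          · rw [hlen1] at h1; simp only [List.length_cons]; omega
          · rw [happ]; exact h3
        · rintro ⟨k, h1, h2, h3⟩
          rcases Nat.lt_or_ge (w.length + 1) (k + neg.length) with hlt | hge
          · refine ⟨k, ?_, by omega, ?_⟩
            · rw [hlen1]; simp only [List.length_cons] at h1; omega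
            · rw [happ] at h3; exact h3
          · -- k + neg.length = w.length + 1, forcing k = 0 and w ++ [t] = neg
            exfalso
            apply hmatch
            have hk0 : k = 0 := by omega
            subst hk0
            have hlenm : (w ++ [t]).length = neg.length := by rw [hlen1]; omega
            rw [List.drop_zero, happ, List.take_left' hlenm] at h3
            exact h3

lemma is_phrase_match_alt_iff (s neg : List String) :
    is_phrase_match_alt s neg = true ↔ ∃ k : ℕ, (s.drop k).take neg.length = neg := by
  unfold is_phrase_match_alt
  by_cases hn : neg.length = 0
  · have : neg = [] := List.eq_nil_of_length_eq_zero hn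
    subst this
    simp
  · have hn' : 0 < neg.length := Nat.pos_of_ne_zero hn
    simp only [hn, beq_iff_eq, if_false]
    rw [pvSlide_iff neg hn' s [] (by simp)]
    simp only [List.nil_append, List.length_nil, Nat.zero_add]
    constructor
    · rintro ⟨k, -, -, h3⟩
      exact ⟨k, h3⟩
    · rintro ⟨k, hk⟩
      have hlk : neg.length ≤ s.length - k := by
        have := congrArg List.length hk
        simpa [List.length_take, List.length_drop] using this.symm.le
      refine ⟨k, by omega, by omega, hk⟩

-- ===== VERDICT (by name: the statement is the Claim_ definition above) =====
theorem is_phrase_match_spec : Claim_equal_is_phrase_match := by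
  intro s neg _
  unfold Spec_is_phrase_match
  rw [Bool.eq_iff_iff, is_phrase_match_iff, is_phrase_match_alt_iff]
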